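-- pv_equiv track=rewrite | github.com/JaeguKim/ROAD-TO-BLUE-CODER | algo/KAKAO/2020KAKAO_REQRUIT/lock.py | getKeyWithPadding
-- ===== SOURCE A (Python) =====
-- def getKeyWithPadding(key,M,N,startRow,startCol):
--     length = N+2*M
--     newMat = []
--     for i in range(length):
--         newMat.append([])
--         for j in range(length):
--             newMat[i].append(0)
--     for i in range(M):
--         for j in range(M):
--             newMat[i+startRow][j+startCol] = key[i][j]
--     return newMat
-- ===== SOURCE B (Python) =====
-- def getKeyWithPadding(key, M, N, startRow, startCol):
--     length = N + 2 * M
--     newMat = []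
--     for i in range(length):
--         if startRow <= i < startRow + M:
--             newMat.append([0] * startCol + list(key[i - startRow][:M]) + [0] * (length - startCol - M))
--         else:
--             newMat.append([0] * length)
--     return newMat
-- ===== Notes on version B (the rewrite author's own statement) =====
-- stated objective: simpler
-- what changed: B builds the padded matrix in a single row-at-a-time pass using list replication ([0]*n) and row slicing (key[i][:M]) instead of A's two phases: an element-by-element zero fill of the whole matrix followed by a nested-loop in-place overwrite of the key block.
-- outside the precondition, e.g. on getKeyWithPadding([[1]], 1, 0, -1, 0): A returns [[0, 0], [1, 0]], B returns [[0, 0], [0, 0]]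
import Mathlib
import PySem

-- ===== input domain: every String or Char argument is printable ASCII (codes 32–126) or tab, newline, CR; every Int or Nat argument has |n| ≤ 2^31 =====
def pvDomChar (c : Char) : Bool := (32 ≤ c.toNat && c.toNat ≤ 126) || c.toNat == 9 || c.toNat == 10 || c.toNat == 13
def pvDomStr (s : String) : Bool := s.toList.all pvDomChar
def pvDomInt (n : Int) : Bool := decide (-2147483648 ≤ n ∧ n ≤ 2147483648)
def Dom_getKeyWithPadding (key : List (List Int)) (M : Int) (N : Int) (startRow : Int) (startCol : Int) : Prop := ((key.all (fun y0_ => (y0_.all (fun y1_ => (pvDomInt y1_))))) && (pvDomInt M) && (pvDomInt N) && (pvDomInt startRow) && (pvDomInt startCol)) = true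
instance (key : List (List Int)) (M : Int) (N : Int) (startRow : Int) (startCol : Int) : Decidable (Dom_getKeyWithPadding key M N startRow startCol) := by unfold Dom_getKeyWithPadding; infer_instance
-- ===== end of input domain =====

-- B builds each padded row directly in one pass (replication + row slice) instead of A's
-- zero-fill-then-overwrite two-phase construction; objective: simpler.


-- ===== PORT A =====
-- Literal port: build an all-zero (N+2M)×(N+2M) matrix by appending element by element,
-- then overwrite the M×M block in place.  pySetD/pyGetD are the total forms of Python's
-- indexed assignment/read; they are exact under Pre_ (all indices in range).
def getKeyWithPadding (key : List (List Int)) (M : Int) (N : Int) (startRow : Int) (startCol : Int) : List (List Int) :=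
  let length := N + 2 * M
  let newMat : List (List Int) :=
    (PySem.List.pyRange 0 length 1).foldl (fun mat _i =>
      mat ++ [(PySem.List.pyRange 0 length 1).foldl (fun row _j => row ++ [(0 : Int)]) []]) []
  (PySem.List.pyRange 0 M 1).foldl (fun mat i =>
    (PySem.List.pyRange 0 M 1).foldl (fun mat2 j =>
      PySem.List.pySetD mat2 (i + startRow)
        (PySem.List.pySetD (PySem.List.pyGetD mat2 (i + startRow) []) (j + startCol)
          (PySem.List.pyGetD (PySem.List.pyGetD key i []) j 0))) mat) newMat

-- ===== PORT B =====
def getKeyWithPadding_alt (key : List (List Int)) (M : Int) (N : Int) (startRow : Int) (startCol : Int) : List (List Int) :=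
  let length := N + 2 * M
  (PySem.List.pyRange 0 length 1).foldl (fun mat i =>
    mat ++ [if startRow ≤ i ∧ i < startRow + M then
        PySem.List.pyRepeat [(0 : Int)] startCol
          ++ PySem.List.slice (PySem.List.pyGetD key (i - startRow) []) none (some M)
          ++ PySem.List.pyRepeat [(0 : Int)] (length - startCol - M)
      else PySem.List.pyRepeat [(0 : Int)] length]) []

-- ===== PRECONDITION & SPEC =====
-- Pre_ excludes the inputs on which A raises IndexError (block sticking out past the matrix
-- end, or key smaller than M×M) and, when M > 0, negative start offsets: there A still
-- returns, but its placement of the key block at the opposite edge is Python's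
-- negative-index wraparound, a corner no caller would specify; B does the natural thing.
def Pre_getKeyWithPadding (key : List (List Int)) (M : Int) (N : Int) (startRow : Int) (startCol : Int) : Prop :=
  M ≤ 0 ∨ (0 ≤ startRow ∧ 0 ≤ startCol ∧ startRow + M ≤ N + 2 * M ∧ startCol + M ≤ N + 2 * M ∧
    M ≤ (key.length : Int) ∧ ∀ row ∈ key.take M.toNat, M ≤ (row.length : Int))
instance (key : List (List Int)) (M : Int) (N : Int) (startRow : Int) (startCol : Int) : Decidable (Pre_getKeyWithPadding key M N startRow startCol) := by unfold Pre_getKeyWithPadding; infer_instance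
def pvWitness_getKeyWithPadding : List (List Int) × Int × Int × Int × Int := ([[1, 2], [3, 4]], 2, 1, 1, 2)
def Spec_getKeyWithPadding (key : List (List Int)) (M : Int) (N : Int) (startRow : Int) (startCol : Int) (out : List (List Int)) : Prop := out = getKeyWithPadding_alt key M N startRow startCol
instance (key : List (List Int)) (M : Int) (N : Int) (startRow : Int) (startCol : Int) (out : List (List Int)) : Decidable (Spec_getKeyWithPadding key M N startRow startCol out) := by unfold Spec_getKeyWithPadding; infer_instance

-- ===== CLAIM (what is proved, stated in full; the proofs are below) =====
def Claim_equal_getKeyWithPadding : Prop := ∀ (key : List (List Int)) (M : Int) (N : Int) (startRow : Int) (startCol : Int), Dom_getKeyWithPadding key M N startRow startCol → Pre_getKeyWithPadding key M N startRow startCol → Spec_getKeyWithPadding key M N startRow startCol (getKeyWithPadding key M N startRow startCol)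

-- ===== LEMMAS AND PROOFS =====

-- A fold appending a constant element once per range step is a replicate.
theorem pvFoldAppendConst {α : Type} (a b : Int) (x : α) (init : List α) :
    (PySem.List.pyRange a b 1).foldl (fun r _ => r ++ [x]) init
      = init ++ List.replicate (b - a).toNat x := by
  rw [PySem.List.foldl_append_singleton_eq_map (f := fun _ => x)]
  simp [PySem.List.pyRange_one, Function.comp_def, List.map_const']

-- take as a map over range (m ≤ length).
theorem pvTakeEqMapRange {α : Type} (xs : List α) (d : α) (m : Nat) (h : m ≤ xs.length) :
    xs.take m = (List.range m).map (fun j => xs.getD j d) := by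
  apply List.ext_getElem
  · simp [h]
  · intro i h1 h2
    simp at h1
    simp [List.getD, List.getElem?_eq_getElem h1.2]

-- Collapse: a fold that each step writes (and reads) only row r of the matrix is one
-- write of the folded row (out-of-range r makes every step, and the collapse, a no-op).
theorem pvSetFoldCollapse {α β : Type} (r : Nat) (idx : β → Nat) (v : β → α)
    (js : List β) (mat : List (List α)) :
    js.foldl (fun m2 j => m2.set r ((m2.getD r []).set (idx j) (v j))) mat
      = mat.set r (js.foldl (fun row j => row.set (idx j) (v j)) (mat.getD r [])) := by
  induction js generalizing mat with
  | nil =>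
      simp only [List.foldl_nil, List.getD]
      by_cases hr : r < mat.length
      · rw [List.getElem?_eq_getElem hr]; simp
      · rw [List.getElem?_eq_none (by omega), List.set_eq_of_length_le (by omega)]
  | cons j js ih =>
      simp only [List.foldl_cons]
      rw [ih, List.set_set]
      by_cases hr : r < mat.length
      · congr 1
        simp [List.getD, List.getElem?_set_self hr]
      · rw [List.set_eq_of_length_le (le_of_not_gt hr), List.set_eq_of_length_le (le_of_not_gt hr)]

-- Core shape: folding writes at increasing offsets off, off+1, …, off+m-1 over a list
-- 'pre ++ replicate s z' (pre.length = off, m ≤ s): each step reads the untouched cell z,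
-- and the result is pre, then the written values, then the remaining z's.
theorem pvFoldSetRange {α : Type} (g : Nat → α → α) (d z : α) (pre : List α)
    (m s off : Nat) (hoff : pre.length = off) (hms : m ≤ s) :
    (List.range m).foldl (fun xs j => xs.set (j + off) (g j (xs.getD (j + off) d)))
        (pre ++ List.replicate s z)
      = pre ++ (List.range m).map (fun j => g j z) ++ List.replicate (s - m) z := by
  induction m with
  | zero => simp
  | succ m ih =>
      rw [List.range_succ, List.foldl_append, ih (le_of_lt (Nat.lt_of_lt_of_le (Nat.lt_succ_self m) hms))]
      have hms' : m < s := Nat.lt_of_lt_of_le (Nat.lt_succ_self m) hms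
      have hlen : (pre ++ (List.range m).map (fun j => g j z)).length = m + off := by
        simp [hoff, Nat.add_comm]
      have hrep : List.replicate (s - m) z = z :: List.replicate (s - (m + 1)) z := by
        have : s - m = (s - (m + 1)) + 1 := by omega
        rw [this, List.replicate_succ]
      rw [List.append_assoc] at *
      simp only [List.foldl_cons, List.foldl_nil]
      have hget : ((pre ++ ((List.range m).map (fun j => g j z) ++ List.replicate (s - m) z))).getD (m + off) d = z := by
        rw [← List.append_assoc, ← hlen, List.getD, List.getElem?_append_right (le_refl _)]
        simp [hrep]
      have hset : ∀ w, ((pre ++ ((List.range m).map (fun j => g j z) ++ List.replicate (s - m) z))).set (m + off) w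
          = pre ++ ((List.range m).map (fun j => g j z) ++ (w :: List.replicate (s - (m + 1)) z)) := by
        intro w
        rw [← List.append_assoc, List.set_append, if_neg (by omega), hlen]
        simp [hrep, List.append_assoc]
      rw [hget, hset]
      simp

-- Same shape for writes that do not read the current cell.
theorem pvFoldSetRange' {α : Type} (f : Nat → α) (z : α) (pre : List α)
    (m s off : Nat) (hoff : pre.length = off) (hms : m ≤ s) :
    (List.range m).foldl (fun xs j => xs.set (j + off) (f j)) (pre ++ List.replicate s z)
      = pre ++ (List.range m).map f ++ List.replicate (s - m) z := by
  have h := pvFoldSetRange (g := fun j _ => f j) (d := z) (z := z) pre m s off hoff hms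
  simpa using h

-- ===== VERDICT (by name: the statement is the Claim_ definition above) =====
theorem getKeyWithPadding_spec : Claim_equal_getKeyWithPadding := by
  intro key M N startRow startCol _hdom hpre
  unfold Spec_getKeyWithPadding getKeyWithPadding getKeyWithPadding_alt
  simp only []
  by_cases hM : M ≤ 0
  · -- no key block is written (A) / no row is in the key band (B): both are the zero matrix
    rw [PySem.List.pyRange_one_eq_nil hM]
    simp only [List.foldl_nil]
    rw [pvFoldAppendConst, pvFoldAppendConst,
        PySem.List.foldl_append_singleton_eq_map
          (f := fun i => if startRow ≤ i ∧ i < startRow + M then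
              PySem.List.pyRepeat [(0 : Int)] startCol
                ++ PySem.List.slice (PySem.List.pyGetD key (i - startRow) []) none (some M)
                ++ PySem.List.pyRepeat [(0 : Int)] (N + 2 * M - startCol - M)
            else PySem.List.pyRepeat [(0 : Int)] (N + 2 * M)),
        List.map_congr_left (g := fun _ => List.replicate (N + 2 * M).toNat (0 : Int))
          (by
            intro i _hi
            rw [if_neg (by omega), PySem.List.pyRepeat_singleton]),
        List.map_const', PySem.List.length_pyRange_one]
    simp
  · rw [not_le] at hM
    rcases hpre with h | ⟨hsr, hsc, hrM, hcM, hkey, hrows⟩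
    · omega
    rw [pvFoldAppendConst, pvFoldAppendConst]
    simp only [List.nil_append, Int.sub_zero]
    rw [PySem.List.pyRange_one 0 M]
    simp only [List.foldl_map, Int.sub_zero, zero_add]
    have hmkey : M.toNat ≤ key.length := by omega
    -- A: collapse each inner loop to one row write, in Nat-indexed form
    have hAcongr := PySem.List.foldl_congr_mem (List.range M.toNat)
      (f := fun x (y : Nat) =>
        List.foldl
          (fun x2 (y1 : Nat) =>
            PySem.List.pySetD x2 (↑y + startRow)
              (PySem.List.pySetD (PySem.List.pyGetD x2 (↑y + startRow) []) (↑y1 + startCol)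
                (PySem.List.pyGetD (PySem.List.pyGetD key ↑y []) (↑y1) 0)))
          x (List.range M.toNat))
      (g := fun mat (k : Nat) =>
        mat.set (k + startRow.toNat)
          ((List.range M.toNat).foldl
            (fun row j => row.set (j + startCol.toNat) ((key.getD k []).getD j 0))
            (mat.getD (k + startRow.toNat) [])))
      (List.replicate (N + 2 * M).toNat (List.replicate (N + 2 * M).toNat 0))
      (by
        intro mat k _hk
        beta_reduce
        have s1 : ∀ (xs : List (List Int)) (v : List Int),
            PySem.List.pySetD xs (↑k + startRow) v = xs.set (k + startRow.toNat) v := by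
          intro xs v
          rw [PySem.List.pySetD_of_nonneg _ _ (by omega)]
          congr 1
          omega
        have g1 : ∀ (xs : List (List Int)),
            PySem.List.pyGetD xs (↑k + startRow) [] = xs.getD (k + startRow.toNat) [] := by
          intro xs
          rw [PySem.List.pyGetD_of_nonneg _ _ (by omega)]
          congr 1
          omega
        have hin := PySem.List.foldl_congr_mem (List.range M.toNat)
          (f := fun x2 (y1 : Nat) =>
            PySem.List.pySetD x2 (↑k + startRow)
              (PySem.List.pySetD (PySem.List.pyGetD x2 (↑k + startRow) []) (↑y1 + startCol)
                (PySem.List.pyGetD (PySem.List.pyGetD key ↑k []) (↑y1) 0)))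
          (g := fun m2 (j : Nat) =>
            m2.set (k + startRow.toNat)
              ((m2.getD (k + startRow.toNat) []).set (j + startCol.toNat) ((key.getD k []).getD j 0)))
          mat
          (by
            intro m2 j _hj
            beta_reduce
            have s2 : ∀ (xs : List Int) (v : Int),
                PySem.List.pySetD xs (↑j + startCol) v = xs.set (j + startCol.toNat) v := by
              intro xs v
              rw [PySem.List.pySetD_of_nonneg _ _ (by omega)]
              congr 1
              omega
            rw [s2, s1, g1, PySem.List.pyGetD_natCast, PySem.List.pyGetD_natCast])
        rw [hin, pvSetFoldCollapse])
    rw [hAcongr,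
        show (List.replicate (N + 2 * M).toNat (List.replicate (N + 2 * M).toNat (0 : Int)))
            = List.replicate startRow.toNat (List.replicate (N + 2 * M).toNat (0 : Int))
                ++ List.replicate ((N + 2 * M).toNat - startRow.toNat)
                    (List.replicate (N + 2 * M).toNat (0 : Int)) from by
          rw [← List.replicate_add]
          congr 1
          omega]
    refine Eq.trans
      (pvFoldSetRange
        (g := fun k row0 => (List.range M.toNat).foldl
          (fun row j => row.set (j + startCol.toNat) ((key.getD k []).getD j 0)) row0)
        (d := []) (z := List.replicate (N + 2 * M).toNat (0 : Int))
        (List.replicate startRow.toNat (List.replicate (N + 2 * M).toNat (0 : Int)))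
        M.toNat ((N + 2 * M).toNat - startRow.toNat) startRow.toNat
        (by simp) (by omega)) ?_
    -- compute each written row
    rw [List.map_congr_left
        (g := fun k => List.replicate startCol.toNat (0 : Int)
          ++ (List.range M.toNat).map (fun j => (key.getD k []).getD j 0)
          ++ List.replicate ((N + 2 * M).toNat - startCol.toNat - M.toNat) (0 : Int))
        (by
          intro k _hk
          rw [show (List.replicate (N + 2 * M).toNat (0 : Int))
              = List.replicate startCol.toNat (0 : Int)
                  ++ List.replicate ((N + 2 * M).toNat - startCol.toNat) (0 : Int) from by
            rw [← List.replicate_add]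
            congr 1
            omega]
          refine Eq.trans
            (pvFoldSetRange' (f := fun j => (key.getD k []).getD j 0) (z := (0 : Int))
              (List.replicate startCol.toNat (0 : Int))
              M.toNat ((N + 2 * M).toNat - startCol.toNat) startCol.toNat
              (by simp) (by omega)) ?_
          rw [show (N + 2 * M).toNat - startCol.toNat - M.toNat
              = (N + 2 * M).toNat - startCol.toNat - M.toNat from rfl])]
    -- B: split the row range into the band and the two zero regions
    rw [PySem.List.foldl_append_singleton_eq_map
        (f := fun i => if startRow ≤ i ∧ i < startRow + M then
            PySem.List.pyRepeat [(0 : Int)] startCol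
              ++ PySem.List.slice (PySem.List.pyGetD key (i - startRow) []) none (some M)
              ++ PySem.List.pyRepeat [(0 : Int)] (N + 2 * M - startCol - M)
          else PySem.List.pyRepeat [(0 : Int)] (N + 2 * M)),
        List.nil_append,
        PySem.List.pyRange_one_append 0 startRow (N + 2 * M) hsr (by omega),
        PySem.List.pyRange_one_append startRow (startRow + M) (N + 2 * M) (by omega) (by omega)]
    simp only [List.map_append]
    rw [List.append_assoc]
    congr 1
    · -- rows above the band are zero rows
      symm
      rw [List.map_congr_left (g := fun _ => List.replicate (N + 2 * M).toNat (0 : Int))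
          (by
            intro i hi
            rw [PySem.List.mem_pyRange_one] at hi
            rw [if_neg (by omega), PySem.List.pyRepeat_singleton]),
          List.map_const', PySem.List.length_pyRange_one]
      congr 1
      omega
    congr 1
    · -- the band: each row is left padding ++ key row ++ right padding
      symm
      rw [PySem.List.pyRange_one startRow (startRow + M),
          show startRow + M - startRow = M from by ring]
      simp only [List.map_map]
      refine List.map_congr_left fun k hk => ?_
      rw [List.mem_range] at hk
      simp only [Function.comp_apply]
      rw [if_pos ⟨by omega, by omega⟩, PySem.List.pyRepeat_singleton,
          PySem.List.pyRepeat_singleton,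
          show startRow + (k : Int) - startRow = (k : Int) from by ring,
          PySem.List.pyGetD_natCast, PySem.List.slice_to _ (by omega)]
      have hkl : k < key.length := by omega
      have hrowlen : M.toNat ≤ (key.getD k []).length := by
        rw [List.getD_eq_getElem key [] hkl]
        have hmem : key[k] ∈ key.take M.toNat := by
          have h1 : k < (key.take M.toNat).length := by simp; omega
          have h2 : (key.take M.toNat)[k] = key[k] := List.getElem_take
          rw [← h2]
          exact List.getElem_mem h1
        have := hrows _ hmem
        omega
      rw [pvTakeEqMapRange (key.getD k []) 0 M.toNat hrowlen,
          show (N + 2 * M - startCol - M).toNat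
              = (N + 2 * M).toNat - startCol.toNat - M.toNat from by omega]
    · -- rows below the band are zero rows
      symm
      rw [List.map_congr_left (g := fun _ => List.replicate (N + 2 * M).toNat (0 : Int))
          (by
            intro i hi
            rw [PySem.List.mem_pyRange_one] at hi
            rw [if_neg (by omega), PySem.List.pyRepeat_singleton]),
          List.map_const', PySem.List.length_pyRange_one]
      congr 1
      omega
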